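-- pv_equiv track=rewrite | github.com/OliverJGC/Coding-Interview-Club | Feb 07 2024/cappyInOut.py | is_sequence_true
-- ===== SOURCE A (Python) =====
-- def is_sequence_true(events):
--     participants_status = {}
--
--     for participant, action in events:
--         if participant not in participants_status:
--             participants_status[participant] = 'out'
--
--         current_status = participants_status[participant]
--
--         if (current_status == 'out' and action == 'out') or (current_status == 'in' and action == 'in'):
--             return False
--         else:
--             participants_status[participant] = 'in' if action == 'in' else 'out'
--
--     return True
-- ===== SOURCE B (Python) =====
-- def is_sequence_true(events):
--     groups = {}
--     for participant, action in events:
--         groups.setdefault(participant, []).append(action)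
--     for actions in groups.values():
--         status = 'out'
--         for action in actions:
--             if status == action:
--                 return False
--             status = 'in' if action == 'in' else 'out'
--     return True
-- ===== Notes on version B (the rewrite author's own statement) =====
-- stated objective: alternative
-- what changed: B first groups each participant's actions into a dict in one pass, then validates each participant's action list independently with a local status, instead of A's single pass that threads a per-participant status dict and checks on the fly.
import Mathlib
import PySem

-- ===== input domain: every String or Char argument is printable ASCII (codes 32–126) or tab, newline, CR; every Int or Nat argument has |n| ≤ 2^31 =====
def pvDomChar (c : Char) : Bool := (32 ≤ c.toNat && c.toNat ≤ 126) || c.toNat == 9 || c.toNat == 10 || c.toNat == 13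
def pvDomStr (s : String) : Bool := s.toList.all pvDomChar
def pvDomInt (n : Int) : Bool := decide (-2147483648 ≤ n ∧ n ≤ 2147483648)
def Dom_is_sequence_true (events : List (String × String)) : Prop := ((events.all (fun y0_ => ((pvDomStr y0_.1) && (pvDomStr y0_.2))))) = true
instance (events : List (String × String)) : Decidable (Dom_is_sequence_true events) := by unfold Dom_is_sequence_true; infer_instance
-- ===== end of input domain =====

-- B groups each participant's actions into a dict first, then validates each participant's
-- list independently; same return value as A's single threaded-status pass (objective: alternative decomposition).

-- ===== PORT A =====
-- A's for-loop: recursion over the remaining events with the status dict as state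
def isSeqGoA (d : PySem.Dict String String) : List (String × String) → Bool
  | [] => true
  | (participant, action) :: rest =>
    let d1 := if d.contains participant = false then d.insert participant "out" else d
    -- participants_status[participant]: the key is guaranteed present here, so getD is exact
    let current_status := d1.getD participant ""
    if (current_status == "out" && action == "out") || (current_status == "in" && action == "in") then
      false
    else
      isSeqGoA (d1.insert participant (if action == "in" then "in" else "out")) rest

def is_sequence_true (events : List (String × String)) : Bool :=
  isSeqGoA PySem.Dict.empty events

-- ===== PORT B =====
-- B's inner loop: validate one participant's action list with a local status
def isSeqValidate (status : String) : List String → Bool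
  | [] => true
  | action :: rest =>
    if status == action then false
    else isSeqValidate (if action == "in" then "in" else "out") rest

def is_sequence_true_alt (events : List (String × String)) : Bool :=
  -- groups.setdefault(p, []).append(a)  ==  d.modify p [] (· ++ [a])
  let groups := events.foldl (fun d pr => d.modify pr.1 [] (fun l => l ++ [pr.2])) PySem.Dict.empty
  groups.values.all (fun actions => isSeqValidate "out" actions)

-- ===== PRECONDITION & SPEC =====
def Spec_is_sequence_true (events : List (String × String)) (out : Bool) : Prop := out = is_sequence_true_alt events
instance (events : List (String × String)) (out : Bool) : Decidable (Spec_is_sequence_true events out) := by unfold Spec_is_sequence_true; infer_instance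

-- ===== CLAIM (what is proved, stated in full; the proofs are below) =====
def Claim_equal_is_sequence_true : Prop := ∀ (events : List (String × String)), Dom_is_sequence_true events → Spec_is_sequence_true events (is_sequence_true events)

-- ===== LEMMAS AND PROOFS =====

-- actions of participant p, in event order
def isSeqActs (p : String) (evs : List (String × String)) : List String :=
  (evs.filter (fun q => q.1 == p)).map (·.2)

theorem isSeqActs_cons (p q a : String) (rest : List (String × String)) :
    isSeqActs p ((q, a) :: rest) = if q = p then a :: isSeqActs p rest else isSeqActs p rest := by
  simp [isSeqActs, List.filter_cons]
  split_ifs <;> simp_all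

-- A's loop succeeds iff every participant's remaining action list validates from its current status
theorem isSeqGoA_true_iff (evs : List (String × String)) :
    ∀ d : PySem.Dict String String,
      (∀ p, d.getD p "out" = "in" ∨ d.getD p "out" = "out") →
      (isSeqGoA d evs = true ↔ ∀ p, isSeqValidate (d.getD p "out") (isSeqActs p evs) = true) := by
  induction evs with
  | nil => intro d _; simp [isSeqGoA, isSeqActs, isSeqValidate]
  | cons hd rest ih =>
    obtain ⟨q, a⟩ := hd
    intro d hinv
    -- the dict after the "if participant not in" step
    set d1 := if d.contains q = false then d.insert q "out" else d with hd1def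
    have hd1 : ∀ p, d1.getD p "out" = d.getD p "out" := by
      intro p
      by_cases hc : d.contains q = false
      · rw [hd1def, if_pos hc, PySem.Dict.getD_insert]
        split_ifs with hpq
        · subst hpq; exact (PySem.Dict.getD_of_not_contains d _ hc).symm
        · rfl
      · rw [hd1def, if_neg hc]
    have hcur : d1.getD q "" = d.getD q "out" := by
      by_cases hc : d.contains q = false
      · rw [hd1def, if_pos hc, PySem.Dict.getD_insert_self, PySem.Dict.getD_of_not_contains d _ hc]
      · have hc' : d.contains q = true := by revert hc; cases d.contains q <;> simp
        rw [hd1def, if_neg hc]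
        rcases h : d.get? q with _ | v
        · rw [PySem.Dict.contains_eq_isSome_get?, h] at hc'; simp at hc'
        · rw [PySem.Dict.getD_eq_get?_getD, PySem.Dict.getD_eq_get?_getD, h]; rfl
    set cur := d.getD q "out" with hcurdef
    show (if (d1.getD q "" == "out" && a == "out") || (d1.getD q "" == "in" && a == "in") then false
          else isSeqGoA (d1.insert q (if a == "in" then "in" else "out")) rest) = true ↔ _
    rw [hcur]
    by_cases hfail : ((cur == "out" && a == "out") || (cur == "in" && a == "in")) = true
    · rw [if_pos hfail]
      have hca : cur = a := by
        simp only [Bool.or_eq_true, Bool.and_eq_true, beq_iff_eq] at hfail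
        rcases hfail with ⟨h1, h2⟩ | ⟨h1, h2⟩ <;> rw [h1, h2]
      simp only [Bool.false_eq_true, false_iff]
      intro hall
      have := hall q
      rw [isSeqActs_cons, if_pos rfl] at this
      simp [isSeqValidate] at this
      exact this.1 hca
    · rw [if_neg hfail]
      have hne : (cur == a) = false := by
        simp only [Bool.or_eq_true, Bool.and_eq_true, beq_iff_eq] at hfail
        push Not at hfail
        rcases hinv q with h | h <;> rw [← hcurdef] at h <;> simp [beq_eq_false_iff_ne, h] <;>
          [exact fun ha => (hfail.2 h ha.symm).elim; exact fun ha => (hfail.1 h ha.symm).elim]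
      set stp := (if a == "in" then "in" else "out") with hstp
      have hinv2 : ∀ p, (d1.insert q stp).getD p "out" = "in" ∨ (d1.insert q stp).getD p "out" = "out" := by
        intro p
        rw [PySem.Dict.getD_insert]
        split_ifs with hpq
        · rw [hstp]; by_cases ha : (a == "in") = true <;> simp [ha]
        · rw [hd1]; exact hinv p
      rw [ih _ hinv2]
      have key : ∀ p, isSeqValidate ((d1.insert q stp).getD p "out") (isSeqActs p rest)
          = isSeqValidate (d.getD p "out") (isSeqActs p ((q, a) :: rest)) := by
        intro p
        rw [isSeqActs_cons]
        by_cases hpq : q = p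
        · subst hpq
          rw [if_pos rfl, PySem.Dict.getD_insert_self, ← hcurdef]
          conv_rhs => rw [isSeqValidate]
          rw [hne, if_neg (by simp), ← hstp]
        · rw [if_neg hpq, PySem.Dict.getD_insert, if_neg (fun h => hpq h.symm), hd1]
      constructor <;> intro h p
      · rw [← key p]; exact h p
      · rw [key p]; exact h p

-- B succeeds iff every participant's full action list validates from "out"
theorem alt_true_iff (evs : List (String × String)) :
    is_sequence_true_alt evs = true ↔ ∀ p, isSeqValidate "out" (isSeqActs p evs) = true := by
  set G := evs.foldl (fun d pr => d.modify pr.1 [] (fun l => l ++ [pr.2])) PySem.Dict.empty with hG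
  have hget : ∀ p, G.getD p [] = isSeqActs p evs := by
    intro p
    rw [hG, PySem.Dict.getD_foldl_modify_append, PySem.Dict.getD_empty]
    simp [isSeqActs]
  have hnd : G.keys.Nodup := by
    rw [hG]
    exact PySem.Dict.nodup_keys_foldl_modify_key _ _ _ _ _ (by simp [PySem.Dict.keys_empty])
  show G.values.all _ = true ↔ _
  rw [List.all_eq_true]
  constructor
  · intro h p
    rcases hv : G.get? p with _ | v
    · have : G.getD p [] = [] := by rw [PySem.Dict.getD_eq_get?_getD, hv]; rfl
      rw [hget p] at this
      rw [this]; rfl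
    · have hmem : (p, v) ∈ G.items := PySem.Dict.mem_items_of_get?_eq_some G hv
      have hvv : v ∈ G.values := by
        simp only [PySem.Dict.values]
        exact List.mem_map.mpr ⟨(p, v), hmem, rfl⟩
      have := h v hvv
      have hveq : v = isSeqActs p evs := by
        rw [← hget p, PySem.Dict.getD_eq_get?_getD, hv]; rfl
      rw [← hveq]; exact this
  · intro h v hv
    simp only [PySem.Dict.values] at hv
    rcases List.mem_map.mp hv with ⟨⟨p, w⟩, hmem, hw⟩
    have := PySem.Dict.getD_of_mem_items G hmem hnd (d0 := [])
    rw [hget p] at this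
    rw [← hw]
    show isSeqValidate "out" w = true
    rw [← this]
    exact h p

-- ===== VERDICT (by name: the statement is the Claim_ definition above) =====
theorem is_sequence_true_spec : Claim_equal_is_sequence_true := by
  intro events _
  unfold Spec_is_sequence_true
  have h1 := isSeqGoA_true_iff events PySem.Dict.empty
    (by intro p; right; rw [PySem.Dict.getD_empty])
  simp only [PySem.Dict.getD_empty] at h1
  have h2 := alt_true_iff events
  have : is_sequence_true events = true ↔ is_sequence_true_alt events = true := by
    show isSeqGoA PySem.Dict.empty events = true ↔ _
    rw [h1, h2]
  cases hA : is_sequence_true events <;> cases hB : is_sequence_true_alt events <;>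
    simp_all
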